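-- pv_equiv track=rewrite | github.com/QuantuSync/alaniz-cipher | alaniz/core/field_ext.py | find_secure_exponent
-- ===== SOURCE A (Python) =====
-- from math import gcd
--
-- def find_secure_exponent(p: int, d: int, min_e: int = 17) -> int:
--     """
--     Find the least prime e >= min_e coprime with p^d - 1.
--
--     For v3, e = 17 is the default; for (p, d) where gcd(17, p^d-1) != 1,
--     the next prime (19, 23, ...) is used.
--     """
--     N = p ** d - 1
--     candidate = min_e
--     while candidate < min_e + 200:
--         if _is_prime(candidate) and gcd(candidate, N) == 1:
--             return candidate
--         candidate += 1
--     raise ValueError(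
--         f"No secure exponent found in [{min_e}, {min_e + 200}) "
--         f"for p={p}, d={d}"
--     )
--
-- def _is_prime(n: int) -> bool:
--     if n < 2: return False
--     if n < 4: return True
--     if n % 2 == 0: return False
--     i = 3
--     while i * i <= n:
--         if n % i == 0: return False
--         i += 2
--     return True
-- ===== SOURCE B (Python) =====
-- def find_secure_exponent(p: int, d: int, min_e: int = 17) -> int:
--     # Same search, but never computes the huge p**d - 1: for a prime e,
--     # gcd(e, p^d - 1) == 1  iff  e does not divide p^d - 1  iff  pow(p, d, e) != 1.
--     for e in range(min_e, min_e + 200):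
--         if _is_prime(e) and pow(p, d, e) != 1:
--             return e
--     raise ValueError(
--         f"No secure exponent found in [{min_e}, {min_e + 200}) "
--         f"for p={p}, d={d}"
--     )
--
-- def _is_prime(n: int) -> bool:
--     if n < 2: return False
--     if n < 4: return True
--     if n % 2 == 0: return False
--     i = 3
--     while i * i <= n:
--         if n % i == 0: return False
--         i += 2
--     return True
-- ===== Notes on version B (the rewrite author's own statement) =====
-- stated objective: faster
-- what changed: Instead of materialising the huge integer p**d - 1 and taking gcd with each prime candidate, B tests each prime candidate e with modular exponentiation: gcd(e, p^d-1)=1 for prime e iff pow(p,d,e) != 1.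
import Mathlib
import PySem

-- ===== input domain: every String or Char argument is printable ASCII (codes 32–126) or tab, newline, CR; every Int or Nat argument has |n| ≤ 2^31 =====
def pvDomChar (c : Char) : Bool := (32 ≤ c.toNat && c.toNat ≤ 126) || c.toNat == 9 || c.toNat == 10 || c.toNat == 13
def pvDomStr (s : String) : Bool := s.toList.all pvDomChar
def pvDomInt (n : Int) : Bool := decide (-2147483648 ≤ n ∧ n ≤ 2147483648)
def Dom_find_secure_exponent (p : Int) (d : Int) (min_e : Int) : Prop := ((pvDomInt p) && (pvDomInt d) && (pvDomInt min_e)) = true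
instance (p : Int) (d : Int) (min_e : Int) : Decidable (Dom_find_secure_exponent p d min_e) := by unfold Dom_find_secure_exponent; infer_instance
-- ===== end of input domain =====

-- B avoids computing the huge p^d - 1: for a prime candidate e, gcd(e, p^d-1) = 1 iff p^d mod e ≠ 1,
-- checked by modular exponentiation. The _is_prime helper is shared unchanged between A and B.

-- ===== PORT A =====
-- shared helper: the trial-division loop of _is_prime ('while i*i <= n: ...', i = 3, 5, 7, ...)
def isPrimeLoop (n : Int) (i : Nat) : Bool :=
  if h : (i : Int) * i ≤ n then
    if n % (i : Int) == 0 then false else isPrimeLoop n (i + 2)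
  else true
termination_by (n + 1 - (i : Int) * i).toNat
decreasing_by
  have h2 : ((i + 2 : Nat) : Int) * ((i + 2 : Nat) : Int) = (i : Int) * i + 4 * i + 4 := by
    push_cast; ring
  have hnn : (0 : Int) ≤ (i : Int) := Int.natCast_nonneg i
  omega

-- shared helper _is_prime (identical in Source A and Source B)
def isPrime (n : Int) : Bool :=
  if n < 2 then false
  else if n < 4 then true
  else if n % 2 == 0 then false
  else isPrimeLoop n 3

-- A's while loop over candidate; exhaustion (Python: ValueError) is excluded by Pre_ and returns 0 here
def findLoopA (N : Int) (min_e : Int) (candidate : Int) : Int :=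
  if h : candidate < min_e + 200 then
    if isPrime candidate && Int.gcd candidate N == 1 then candidate
    else findLoopA N min_e (candidate + 1)
  else 0
termination_by (min_e + 200 - candidate).toNat

def find_secure_exponent (p : Int) (d : Int) (min_e : Int) : Int :=
  findLoopA (p ^ d.toNat - 1) min_e min_e   -- N = p ** d - 1 (Pre_ has 0 ≤ d; Python raises for d < 0)

-- ===== PORT B =====
-- port of Python's three-argument pow(b, n, m) for n ≥ 0 (binary exponentiation; exact for m > 0,
-- the only case Source B reaches since it is guarded by _is_prime(e))
def powModB (b : Int) (n : Nat) (m : Int) : Int :=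
  if n = 0 then 1 % m
  else
    let h := powModB b (n / 2) m
    let h2 := h * h % m
    if n % 2 == 1 then h2 * b % m else h2

-- B's 'for e in range(min_e, min_e + 200)' loop; exhaustion (Python: ValueError) returns 0 here
def findLoopB (p : Int) (dn : Nat) : List Int → Int
  | [] => 0
  | e :: rest => if isPrime e && powModB p dn e != 1 then e else findLoopB p dn rest

def find_secure_exponent_alt (p : Int) (d : Int) (min_e : Int) : Int :=
  findLoopB p d.toNat (PySem.List.pyRange (min_e) (min_e + 200) 1)

-- ===== PRECONDITION & SPEC =====
-- Pre_ = exactly the inputs on which Python A returns: d ≥ 0 (p**d is a float for d < 0, so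
-- math.gcd raises TypeError) and some prime e in [min_e, min_e+200) does not divide p^d - 1;
-- otherwise A's loop exhausts and raises ValueError.
def Pre_find_secure_exponent (p : Int) (d : Int) (min_e : Int) : Prop :=
  0 ≤ d ∧ ∃ e ∈ PySem.List.pyRange min_e (min_e + 200) 1,
    Nat.Prime e.toNat ∧ ¬ ((e : Int) ∣ p ^ d.toNat - 1)
instance (p : Int) (d : Int) (min_e : Int) : Decidable (Pre_find_secure_exponent p d min_e) := by
  unfold Pre_find_secure_exponent; infer_instance

def pvWitness_find_secure_exponent : Int × Int × Int := (2, 3, 17)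

def Spec_find_secure_exponent (p : Int) (d : Int) (min_e : Int) (out : Int) : Prop := out = find_secure_exponent_alt p d min_e
instance (p : Int) (d : Int) (min_e : Int) (out : Int) : Decidable (Spec_find_secure_exponent p d min_e out) := by unfold Spec_find_secure_exponent; infer_instance

-- ===== CLAIM (what is proved, stated in full; the proofs are below) =====
def Claim_equal_find_secure_exponent : Prop := ∀ (p : Int) (d : Int) (min_e : Int), Dom_find_secure_exponent p d min_e → Pre_find_secure_exponent p d min_e → Spec_find_secure_exponent p d min_e (find_secure_exponent p d min_e)

-- ===== LEMMAS AND PROOFS =====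

theorem emod_mul_emod (a b m : Int) : a % m * b % m = a * b % m := by
  rw [Int.mul_emod, Int.emod_emod_of_dvd _ dvd_rfl, ← Int.mul_emod]

theorem powModB_eq (b : Int) (n : Nat) (m : Int) : powModB b n m = b ^ n % m := by
  induction n using Nat.strong_induction_on with
  | _ n ih =>
    rw [powModB]
    by_cases h0 : n = 0
    · simp [h0]
    · simp only [h0, ite_false]
      rw [ih (n / 2) (Nat.div_lt_self (Nat.pos_of_ne_zero h0) one_lt_two)]
      have e1 : b ^ (n / 2) % m * (b ^ (n / 2) % m) % m = b ^ (n / 2) * b ^ (n / 2) % m := by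
        rw [← Int.mul_emod]
      by_cases hp : n % 2 = 1
      · have hb : ((n % 2 == 1) : Bool) = true := by simp [hp]
        rw [hb, if_pos rfl, e1, emod_mul_emod]
        congr 1
        rw [← pow_add, ← pow_succ]
        congr 1
        omega
      · have hb : ((n % 2 == 1) : Bool) = false := by simp [hp]
        rw [hb, if_neg (by simp), e1]
        congr 1
        rw [← pow_add]
        congr 1
        omega

theorem isPrimeLoop_sound (n : Int) :
    ∀ (k : Nat) (i : Nat), (n + 1 - (i : Int) * i).toNat ≤ k → isPrimeLoop n i = true →
      ∀ j : Nat, i ≤ j → j % 2 = i % 2 → (j : Int) * j ≤ n → ¬ (j : Int) ∣ n := by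
  intro k
  induction k with
  | zero =>
    intro i hk _h j hij hpar hj2 _hdvd
    have hji : (i : Int) ≤ (j : Int) := by exact_mod_cast hij
    have hsq : (i : Int) * i ≤ (j : Int) * j := by nlinarith [Int.natCast_nonneg i]
    omega
  | succ k ih =>
    intro i hk h j hij hpar hj2
    by_cases hle : (i : Int) * i ≤ n
    · rw [isPrimeLoop, dif_pos hle] at h
      by_cases hd : (n % (i : Int) == 0) = true
      · rw [if_pos hd] at h
        exact absurd h (by simp)
      · rw [if_neg hd] at h
        simp only [beq_iff_eq] at hd
        rcases eq_or_lt_of_le hij with rfl | hlt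
        · intro hdvd
          exact hd (Int.emod_eq_zero_of_dvd hdvd)
        · have hmeas : (n + 1 - ((i + 2 : Nat) : Int) * ((i + 2 : Nat) : Int)).toNat ≤ k := by
            have hc : ((i + 2 : Nat) : Int) * ((i + 2 : Nat) : Int) = (i : Int) * i + 4 * i + 4 := by
              push_cast; ring
            have hi0 : (0 : Int) ≤ (i : Int) := Int.natCast_nonneg i
            omega
          exact ih (i + 2) hmeas h j (by omega) (by omega) hj2
    · exfalso
      have hji : (i : Int) ≤ (j : Int) := by exact_mod_cast hij
      have hsq : (i : Int) * i ≤ (j : Int) * j := by nlinarith [Int.natCast_nonneg i]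
      omega

theorem isPrime_sound (c : Int) (h : isPrime c = true) : Nat.Prime c.toNat ∧ 2 ≤ c := by
  rw [isPrime] at h
  by_cases h2 : c < 2
  · simp [h2] at h
  rw [not_lt] at h2
  rw [if_neg (by omega)] at h
  refine ⟨?_, h2⟩
  by_cases h4 : c < 4
  · interval_cases c <;> decide
  rw [not_lt] at h4
  rw [if_neg (by omega)] at h
  by_cases hodd : (c % 2 == 0) = true
  · simp [hodd] at h
  rw [if_neg hodd] at h
  simp only [beq_iff_eq] at hodd
  by_contra hnp
  set m := c.toNat with hm
  have hcn : ((m : Nat) : Int) = c := Int.toNat_of_nonneg (by omega)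
  have hq : m.minFac.Prime := Nat.minFac_prime (by omega)
  have hqd : m.minFac ∣ m := Nat.minFac_dvd m
  have hqs : m.minFac * m.minFac ≤ m := by
    have := Nat.minFac_sq_le_self (by omega) hnp
    rwa [pow_two] at this
  have hq2 : m.minFac ≠ 2 := by
    intro he
    have h2d : (2 : Int) ∣ c := by
      have : ((2 : Nat) : Int) ∣ ((m : Nat) : Int) := Int.natCast_dvd_natCast.mpr (he ▸ hqd)
      rwa [hcn] at this
    omega
  have hq3 : 3 ≤ m.minFac := by
    have h2le := hq.two_le
    by_contra hlt
    have : m.minFac = 2 := by omega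
    exact hq2 this
  have hqodd : m.minFac % 2 = 1 := by
    rcases Nat.mod_two_eq_zero_or_one m.minFac with h0 | h1
    · exact absurd ((Nat.Prime.even_iff hq).mp (Nat.even_iff.mpr h0)) hq2
    · exact h1
  have hcast : ((m.minFac : Nat) : Int) ∣ c := by
    have := Int.natCast_dvd_natCast.mpr hqd
    rwa [hcn] at this
  have hsq : ((m.minFac : Nat) : Int) * (m.minFac : Nat) ≤ c := by
    have := Int.ofNat_le.mpr hqs
    push_cast at this
    rw [hcn] at this
    exact this
  exact isPrimeLoop_sound c ((c + 1 - (3:Int) * 3).toNat) 3 le_rfl h m.minFac hq3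
    (by omega) hsq hcast

theorem condEq (p : Int) (dn : Nat) (c : Int) (hc : isPrime c = true) :
    (Int.gcd c (p ^ dn - 1) == 1) = (powModB p dn c != 1) := by
  obtain ⟨hq, hc2⟩ := isPrime_sound c hc
  rw [powModB_eq]
  have h1m : (1 : Int) % c = 1 := Int.emod_eq_of_lt (by omega) (by omega)
  have hdvd_iff : (c ∣ p ^ dn - 1) ↔ p ^ dn % c = 1 := by
    have h' : (p ^ dn % c = 1 % c) ↔ c ∣ 1 - p ^ dn := Int.modEq_iff_dvd
    rw [h1m] at h'
    rw [dvd_sub_comm]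
    exact h'.symm
  have hq' : c.natAbs.Prime := by
    have hca : c.natAbs = c.toNat := by omega
    rwa [hca]
  have hgcd_iff : Int.gcd c (p ^ dn - 1) = 1 ↔ ¬ (c ∣ p ^ dn - 1) := by
    show c.natAbs.gcd (p ^ dn - 1).natAbs = 1 ↔ _
    rw [← Int.natAbs_dvd_natAbs]
    exact Nat.Prime.coprime_iff_not_dvd hq'
  rcases Bool.eq_false_or_eq_true (Int.gcd c (p ^ dn - 1) == 1) with hb | hb <;> rw [hb]
  · have hg : Int.gcd c (p ^ dn - 1) = 1 := by simpa using hb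
    have := hgcd_iff.mp hg
    rw [hdvd_iff] at this
    simp [this]
  · have hne : ¬ Int.gcd c (p ^ dn - 1) = 1 := by simpa using hb
    have hdv : c ∣ p ^ dn - 1 := by
      by_contra hnd
      exact hne (hgcd_iff.mpr hnd)
    have := hdvd_iff.mp hdv
    simp [this]

theorem loops_eq (p : Int) (dn : Nat) (min_e : Int) :
    ∀ (k : Nat) (c : Int), (min_e + 200 - c).toNat = k →
      findLoopA (p ^ dn - 1) min_e c = findLoopB p dn (PySem.List.pyRange c (min_e + 200) 1) := by
  intro k
  induction k with
  | zero =>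
    intro c hk
    have hge : min_e + 200 ≤ c := by omega
    rw [findLoopA, dif_neg (by omega), PySem.List.pyRange_one_eq_nil hge, findLoopB]
  | succ k ih =>
    intro c hk
    have hlt : c < min_e + 200 := by omega
    rw [findLoopA, dif_pos hlt, PySem.List.pyRange_one_cons hlt, findLoopB]
    by_cases hp : isPrime c = true
    · rw [condEq p dn c hp]
      by_cases hcond : (powModB p dn c != 1) = true
      · simp [hp, hcond]
      · simp only [Bool.not_eq_true] at hcond
        simp only [hp, hcond, Bool.and_false, Bool.false_eq_true, if_false]
        exact ih (c + 1) (by omega)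
    · simp only [Bool.not_eq_true] at hp
      simp only [hp, Bool.false_and, Bool.false_eq_true, if_false]
      exact ih (c + 1) (by omega)

-- ===== VERDICT (by name: the statement is the Claim_ definition above) =====
theorem find_secure_exponent_spec : Claim_equal_find_secure_exponent := by
  intro p d min_e _hdom _hpre
  unfold Spec_find_secure_exponent find_secure_exponent find_secure_exponent_alt
  exact loops_eq p d.toNat min_e (min_e + 200 - min_e).toNat min_e rfl
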